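-- pv_equiv track=rewrite | github.com/yaolinli/VDEdit | codes/metrics/eval_en/utils.py | filter_repetitive
-- ===== SOURCE A (Python) =====
-- def get_dist(w1, w2):
--     dist = -1
--     if w1 == w2:
--         dist = 0
--     elif "mask" in w1 and len(w1) > len("mask"):
--         dist = 10
--     else:
--         dist = 100
--     return dist
--
-- def filter_repetitive(align_path, ref, gen):
--     history = None
--     rm_idx = []
--     for idx, (i,j) in enumerate(align_path):
--         if idx == 0:
--             history = (i,j, idx)
--             continue
--         if j == history[1]:
--             cur_dist = get_dist(ref[i], gen[j])
--             his_dist = get_dist(ref[history[0]], gen[history[1]])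
--             if cur_dist < his_dist:
--                 rm_idx.append(history[2])
--                 history = (i,j, idx)
--             else:
--                 rm_idx.append(idx)
--             continue
--         history = (i,j, idx)
--     newpath = [align_path[i] for i in range(len(align_path)) if i not in rm_idx]
--     return newpath
-- ===== SOURCE B (Python) =====
-- def get_dist(w1, w2):
--     dist = -1
--     if w1 == w2:
--         dist = 0
--     elif "mask" in w1 and len(w1) > len("mask"):
--         dist = 10
--     else:
--         dist = 100
--     return dist
--
-- def filter_repetitive(align_path, ref, gen):
--     # Group consecutive entries sharing the same j; keep the entry with the
--     # smallest get_dist (first one on ties) from each group.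
--     newpath = []
--     k, n = 0, len(align_path)
--     while k < n:
--         j = align_path[k][1]
--         m = k + 1
--         while m < n and align_path[m][1] == j:
--             m += 1
--         if m - k == 1:
--             newpath.append(align_path[k])
--         else:
--             newpath.append(min(align_path[k:m],
--                                key=lambda p: get_dist(ref[p[0]], gen[p[1]])))
--         k = m
--     return newpath
-- ===== Notes on version B (the rewrite author's own statement) =====
-- stated objective: simpler
-- what changed: Replaces the history/rm_idx removal bookkeeping plus a final index-filtering comprehension by a direct group-then-select pass: split the path into maximal runs of consecutive equal j and keep the first distance-minimal entry of each run.
import Mathlib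
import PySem

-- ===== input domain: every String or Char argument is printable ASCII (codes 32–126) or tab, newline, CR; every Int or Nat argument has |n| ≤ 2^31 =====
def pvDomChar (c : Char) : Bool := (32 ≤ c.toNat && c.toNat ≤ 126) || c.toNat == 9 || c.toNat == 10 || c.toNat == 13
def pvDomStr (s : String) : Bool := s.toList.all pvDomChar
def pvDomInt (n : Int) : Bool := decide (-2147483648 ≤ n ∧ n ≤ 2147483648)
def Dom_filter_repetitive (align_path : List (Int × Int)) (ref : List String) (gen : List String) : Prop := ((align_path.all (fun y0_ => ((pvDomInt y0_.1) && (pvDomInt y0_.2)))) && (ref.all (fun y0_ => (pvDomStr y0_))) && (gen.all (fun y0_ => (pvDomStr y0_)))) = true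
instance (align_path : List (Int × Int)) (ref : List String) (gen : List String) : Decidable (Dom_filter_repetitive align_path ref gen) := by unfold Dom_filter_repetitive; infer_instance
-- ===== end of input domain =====

-- B replaces A's history/rm_idx removal bookkeeping (plus the final index-filtering
-- comprehension) by a direct group-then-select pass over maximal runs of equal j;
-- objective: simpler. Return-value equivalence; neither version mutates its arguments.

-- ===== PORT A =====
-- helper get_dist, shared by both ports (B keeps it unchanged)
def get_dist (w1 w2 : String) : Int :=
  if w1 = w2 then 0
  else if PySem.Str.isIn "mask" w1 ∧ PySem.Str.len w1 > PySem.Str.len "mask" then 10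
  else 100

-- get_dist(ref[i], gen[j]); on inputs admitted by Pre_ the pyGet? never misses,
-- so the default "" is never used there
def pvKey (ref gen : List String) (p : Int × Int) : Int :=
  get_dist ((PySem.List.pyGet? ref p.1).getD "") ((PySem.List.pyGet? gen p.2).getD "")

-- A's main loop (from idx = 1 on, history already holding (i, j, idx) of entry 0)
def loopA (ref gen : List String) : List (Int × Int) → Nat → (Int × Int × Nat) → List Nat → List Nat
  | [], _, _, rm => rm
  | (i, j) :: rest, idx, (hi, hj, hidx), rm =>
    if j = hj then
      let cur_dist := pvKey ref gen (i, j)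
      let his_dist := pvKey ref gen (hi, hj)
      if cur_dist < his_dist then
        loopA ref gen rest (idx + 1) (i, j, idx) (rm ++ [hidx])
      else
        loopA ref gen rest (idx + 1) (hi, hj, hidx) (rm ++ [idx])
    else
      loopA ref gen rest (idx + 1) (i, j, idx) rm

def filter_repetitive (align_path : List (Int × Int)) (ref : List String) (gen : List String) : List (Int × Int) :=
  let rm_idx : List Nat :=
    match align_path with
    | [] => []
    | (i, j) :: rest => loopA ref gen rest 1 (i, j, 0) []
  (List.range align_path.length).filterMap
    (fun k => if k ∈ rm_idx then none else PySem.List.pyGet? align_path (k : Int))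

-- ===== PORT B =====
-- min(group, key=…): Python's min keeps the first minimal element
def bestOf (ref gen : List String) (p : Int × Int) (grp : List (Int × Int)) : Int × Int :=
  grp.foldl (fun best q => if pvKey ref gen q < pvKey ref gen best then q else best) p

def loopB (ref gen : List String) : List (Int × Int) → List (Int × Int)
  | [] => []
  | p :: rest =>
    let grp := rest.takeWhile (fun q => q.2 == p.2)
    let best := if grp.isEmpty then p else bestOf ref gen p grp
    best :: loopB ref gen (rest.dropWhile (fun q => q.2 == p.2))
termination_by l => l.length
decreasing_by
  simpa using Nat.lt_succ_of_le (List.length_dropWhile_le _ _)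

def filter_repetitive_alt (align_path : List (Int × Int)) (ref : List String) (gen : List String) : List (Int × Int) :=
  loopB ref gen align_path

-- ===== PRECONDITION & SPEC =====
-- Pre_ excludes exactly the inputs on which A raises IndexError: an entry of a
-- run of ≥ 2 consecutive equal-j entries whose i (for ref) or j (for gen) is out
-- of Python's index range.  B raises on exactly the same inputs.
def Pre_filter_repetitive (align_path : List (Int × Int)) (ref : List String) (gen : List String) : Prop :=
  ∀ pq ∈ align_path.zip align_path.tail, pq.1.2 = pq.2.2 →
    PySem.Raise.InRange ref.length pq.1.1 ∧ PySem.Raise.InRange ref.length pq.2.1 ∧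
    PySem.Raise.InRange gen.length pq.1.2

instance (align_path : List (Int × Int)) (ref : List String) (gen : List String) : Decidable (Pre_filter_repetitive align_path ref gen) := by unfold Pre_filter_repetitive; infer_instance

def pvWitness_filter_repetitive : (List (Int × Int)) × List String × List String :=
  ([(0, 0), (1, 0), (1, 1)], ["a", "mask"], ["a", "b"])

def Spec_filter_repetitive (align_path : List (Int × Int)) (ref : List String) (gen : List String) (out : List (Int × Int)) : Prop := out = filter_repetitive_alt align_path ref gen
instance (align_path : List (Int × Int)) (ref : List String) (gen : List String) (out : List (Int × Int)) : Decidable (Spec_filter_repetitive align_path ref gen out) := by unfold Spec_filter_repetitive; infer_instance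

-- ===== CLAIM (what is proved, stated in full; the proofs are below) =====
def Claim_equal_filter_repetitive : Prop := ∀ (align_path : List (Int × Int)) (ref : List String) (gen : List String), Dom_filter_repetitive align_path ref gen → Pre_filter_repetitive align_path ref gen → Spec_filter_repetitive align_path ref gen (filter_repetitive align_path ref gen)

-- ===== LEMMAS AND PROOFS =====

-- rm is a pure accumulator: loopA only appends to it
theorem loopA_append (ref gen : List String) :
    ∀ (l : List (Int × Int)) (idx : Nat) (hist : Int × Int × Nat) (rm : List Nat),
      loopA ref gen l idx hist rm = rm ++ loopA ref gen l idx hist [] := by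
  intro l
  induction l with
  | nil => intro idx hist rm; simp [loopA]
  | cons q rest ih =>
    intro idx hist rm
    obtain ⟨i, j⟩ := q
    obtain ⟨hi, hj, hidx⟩ := hist
    simp only [loopA]
    split_ifs with h1 h2
    · rw [ih _ _ (rm ++ [hidx]), ih _ _ ([] ++ [hidx])]
      simp
    · rw [ih _ _ (rm ++ [idx]), ih _ _ ([] ++ [idx])]
      simp
    · rw [ih _ _ rm]

-- every index loopA removes lies between the history index and the end
theorem mem_loopA_bounds (ref gen : List String) :
    ∀ (l : List (Int × Int)) (idx : Nat) (hi hj : Int) (hn : Nat),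
      hn < idx → ∀ x ∈ loopA ref gen l idx (hi, hj, hn) [], hn ≤ x ∧ x < idx + l.length := by
  intro l
  induction l with
  | nil => intro idx hi hj hn _ x hx; simp [loopA] at hx
  | cons q rest ih =>
    intro idx hi hj hn hlt x hx
    obtain ⟨i, j⟩ := q
    simp only [loopA] at hx
    split_ifs at hx with h1 h2
    · rw [loopA_append] at hx
      rcases List.mem_append.mp hx with h | h
      · simp only [List.nil_append, List.mem_singleton] at h
        subst h; simp only [List.length_cons]; omega
      · have := ih (idx + 1) i j idx (by omega) x h
        simp only [List.length_cons]; omega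
    · rw [loopA_append] at hx
      rcases List.mem_append.mp hx with h | h
      · simp only [List.nil_append, List.mem_singleton] at h
        subst h; simp only [List.length_cons]; omega
      · have := ih (idx + 1) hi hj hn (by omega) x h
        simp only [List.length_cons]; omega
    · have := ih (idx + 1) i j idx (by omega) x hx
      simp only [List.length_cons]; omega

-- loopB drops a strictly cheaper head of a run
theorem loopB_drop_head (ref gen : List String) (h q : Int × Int) (l : List (Int × Int))
    (hj : q.2 = h.2) (hlt : pvKey ref gen q < pvKey ref gen h) :
    loopB ref gen (h :: q :: l) = loopB ref gen (q :: l) := by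
  rw [loopB, loopB]
  have htw : (q :: l).takeWhile (fun r => r.2 == h.2) = q :: l.takeWhile (fun r => r.2 == h.2) := by
    simp [hj]
  have hdw : (q :: l).dropWhile (fun r => r.2 == h.2) = l.dropWhile (fun r => r.2 == h.2) := by
    simp [hj]
  have hpred : (fun r : Int × Int => r.2 == q.2) = (fun r => r.2 == h.2) := by
    funext r; rw [hj]
  rw [htw, hdw, hpred]
  congr 1
  simp only [List.isEmpty_cons, Bool.false_eq_true, if_false, bestOf, List.foldl_cons,
    if_pos hlt]
  cases hcase : l.takeWhile (fun r => r.2 == h.2) with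
  | nil => simp
  | cons a as => simp

-- loopB ignores a not-cheaper second element of a run
theorem loopB_drop_second (ref gen : List String) (h q : Int × Int) (l : List (Int × Int))
    (hj : q.2 = h.2) (hge : ¬ pvKey ref gen q < pvKey ref gen h) :
    loopB ref gen (h :: q :: l) = loopB ref gen (h :: l) := by
  rw [loopB, loopB]
  have htw : (q :: l).takeWhile (fun r => r.2 == h.2) = q :: l.takeWhile (fun r => r.2 == h.2) := by
    simp [hj]
  have hdw : (q :: l).dropWhile (fun r => r.2 == h.2) = l.dropWhile (fun r => r.2 == h.2) := by
    simp [hj]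
  rw [htw, hdw]
  congr 1
  simp only [List.isEmpty_cons, Bool.false_eq_true, if_false, bestOf, List.foldl_cons,
    if_neg hge]
  cases hcase : l.takeWhile (fun r => r.2 == h.2) with
  | nil => simp
  | cons a as => simp

-- main invariant: the kept head plus the kept indexed suffix is B's run selection
theorem main_loop (ref gen : List String) :
    ∀ (l : List (Int × Int)) (idx hn : Nat) (h1 h2 : Int), hn < idx →
      ((if hn ∈ loopA ref gen l idx (h1, h2, hn) [] then ([] : List (Int × Int)) else [(h1, h2)]) ++
        (l.zipIdx idx).filterMap
          (fun pk => if pk.2 ∈ loopA ref gen l idx (h1, h2, hn) [] then none else some pk.1))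
      = loopB ref gen ((h1, h2) :: l) := by
  intro l
  induction l with
  | nil =>
    intro idx hn h1 h2 _
    simp [loopA, loopB]
  | cons q rest ih =>
    intro idx hn h1 h2 hlt
    obtain ⟨i, j⟩ := q
    by_cases hj : j = h2
    · by_cases hcmp : pvKey ref gen (i, j) < pvKey ref gen (h1, h2)
      · -- current entry strictly cheaper: old history index hn is removed
        have hun : loopA ref gen ((i, j) :: rest) idx (h1, h2, hn) []
            = hn :: loopA ref gen rest (idx + 1) (i, j, idx) [] := by
          simp only [loopA, if_pos hj, if_pos hcmp]
          rw [loopA_append]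
          simp
        rw [hun]
        set delta := loopA ref gen rest (idx + 1) (i, j, idx) [] with hdelta
        rw [if_pos (List.mem_cons_self)]
        have hfm : (((i, j) :: rest).zipIdx idx).filterMap
              (fun pk => if pk.2 ∈ hn :: delta then none else some pk.1)
            = (((i, j) :: rest).zipIdx idx).filterMap
              (fun pk => if pk.2 ∈ delta then none else some pk.1) := by
          apply List.filterMap_congr
          rintro ⟨p, k⟩ hpk
          have hk := (List.mem_zipIdx hpk).1
          have hkne : k ≠ hn := by omega
          simp [List.mem_cons, hkne]
        rw [hfm, List.zipIdx_cons, List.filterMap_cons]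
        rw [loopB_drop_head ref gen (h1, h2) (i, j) rest hj hcmp]
        have hIH := ih (idx + 1) idx i j (by omega)
        rw [← hdelta] at hIH
        simp only [List.nil_append]
        split_ifs with hcase
        · rw [← hIH, if_pos hcase]; simp
        · rw [← hIH, if_neg hcase]; simp
      · -- history stays: the current index idx is removed
        have hun : loopA ref gen ((i, j) :: rest) idx (h1, h2, hn) []
            = idx :: loopA ref gen rest (idx + 1) (h1, h2, hn) [] := by
          simp only [loopA, if_pos hj, if_neg hcmp]
          rw [loopA_append]
          simp
        rw [hun]
        set delta := loopA ref gen rest (idx + 1) (h1, h2, hn) [] with hdelta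
        have hhn : (hn ∈ idx :: delta) ↔ hn ∈ delta := by
          have : hn ≠ idx := by omega
          simp [List.mem_cons, this]
        have hfm : ((rest).zipIdx (idx + 1)).filterMap
              (fun pk => if pk.2 ∈ idx :: delta then none else some pk.1)
            = ((rest).zipIdx (idx + 1)).filterMap
              (fun pk => if pk.2 ∈ delta then none else some pk.1) := by
          apply List.filterMap_congr
          rintro ⟨p, k⟩ hpk
          have hk := (List.mem_zipIdx hpk).1
          have hkne : k ≠ idx := by omega
          simp [List.mem_cons, hkne]
        rw [List.zipIdx_cons, List.filterMap_cons, if_pos (List.mem_cons_self), hfm]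
        rw [loopB_drop_second ref gen (h1, h2) (i, j) rest hj hcmp]
        have hIH := ih (idx + 1) hn h1 h2 (by omega)
        rw [← hdelta] at hIH
        simp only [hhn]
        exact hIH
    · -- run break: fresh history (i, j, idx); nothing is removed at this step
      have hun : loopA ref gen ((i, j) :: rest) idx (h1, h2, hn) []
          = loopA ref gen rest (idx + 1) (i, j, idx) [] := by
        simp only [loopA, if_neg hj]
      rw [hun]
      set delta := loopA ref gen rest (idx + 1) (i, j, idx) [] with hdelta
      have hhn : hn ∉ delta := by
        intro hm
        have := mem_loopA_bounds ref gen rest (idx + 1) i j idx (by omega) hn hm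
        omega
      rw [if_neg hhn, List.zipIdx_cons, List.filterMap_cons]
      have hIH := ih (idx + 1) idx i j (by omega)
      rw [← hdelta] at hIH
      have hB : loopB ref gen ((h1, h2) :: (i, j) :: rest)
          = (h1, h2) :: loopB ref gen ((i, j) :: rest) := by
        rw [loopB]
        have htw : ((i, j) :: rest).takeWhile (fun r => r.2 == h2) = [] := by
          simp [hj]
        have hdw : ((i, j) :: rest).dropWhile (fun r => r.2 == h2) = (i, j) :: rest := by
          simp [hj]
        rw [htw, hdw]
        simp
      rw [hB, ← hIH]
      split_ifs with hcase <;> simp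

-- the range/pyGet? comprehension is the indexed filter over zipIdx
theorem bridge {P : Type} (ap : List P) :
    ∀ (rm : List Nat) (s : Nat),
      (List.range ap.length).filterMap (fun k => if (s + k) ∈ rm then none else ap[k]?)
      = (ap.zipIdx s).filterMap (fun pk => if pk.2 ∈ rm then none else some pk.1) := by
  induction ap with
  | nil => intro rm s; simp
  | cons p rest ih =>
    intro rm s
    rw [List.length_cons, List.range_succ_eq_map, List.filterMap_cons, List.filterMap_map,
      List.zipIdx_cons, List.filterMap_cons]
    have hcomp : ((fun k => if (s + k) ∈ rm then none else (p :: rest)[k]?) ∘ Nat.succ)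
        = fun k => if ((s + 1) + k) ∈ rm then none else rest[k]? := by
      funext k
      have harith : s + (k + 1) = s + 1 + k := by omega
      simp only [Function.comp, Nat.succ_eq_add_one, List.getElem?_cons_succ, harith]
    rw [hcomp, ih rm (s + 1)]
    simp

-- ===== VERDICT (by name: the statement is the Claim_ definition above) =====
theorem filter_repetitive_spec : Claim_equal_filter_repetitive := by
  intro ap ref gen _ _
  unfold Spec_filter_repetitive filter_repetitive filter_repetitive_alt
  cases ap with
  | nil => simp [loopB]
  | cons q rest =>
    obtain ⟨i, j⟩ := q
    simp only
    have hpg : (fun k : Nat => if k ∈ loopA ref gen rest 1 (i, j, 0) [] then none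
          else PySem.List.pyGet? ((i, j) :: rest) (k : Int))
        = fun k : Nat => if (0 + k) ∈ loopA ref gen rest 1 (i, j, 0) [] then none
          else ((i, j) :: rest)[k]? := by
      funext k
      rw [Nat.zero_add, PySem.List.pyGet?_natCast]
    rw [hpg, bridge ((i, j) :: rest) (loopA ref gen rest 1 (i, j, 0) []) 0,
      List.zipIdx_cons, List.filterMap_cons]
    have hml := main_loop ref gen rest 1 0 i j (by omega)
    rw [← hml]
    split_ifs with hcase <;> simp
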